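-- pv_equiv track=rewrite | github.com/takada-at/sshbenri | sshbenri/sshbenri.py | quotecommands
-- ===== SOURCE A (Python) =====
-- def quotecommands(commands):
--     """
--     SSHコマンドのクオート
--
--     Arguments:
--       commands(list): ssh command list
--     """
--     depth = len(commands)-1
--     res   = ""
--     for depth, command in enumerate(commands):
--         escapechar = getescapechar(depth)
--         escapedcommand = escape(command, depth)
--         res += ' ' + escapedcommand
--
--     return res.strip()
--
-- def getescapechar(depth):
--     x = (2 ** depth) - 1
--     return '\\' * int(x)
--
-- specialchars = ['$', '~', '&', '|']
--
-- def escape(command, depth):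
--     """
--     コマンドのエスケープ
--
--     Arguments:
--       command(str): コマンド
--       depth(int): 深さ
--
--     Example::
--
--     >>> escape('ssh -i ~/key', 1)
--     'ssh -i \\~/'
--     """
--     escapechar = getescapechar(depth)
--     escapedcommand = command.replace('\\', '\\'*(2**depth))
--     for char in specialchars:
--         escapedcommand = escapedcommand.replace(char, escapechar+char)
--
--     return escapedcommand
-- ===== SOURCE B (Python) =====
-- def _escape_once(command, depth):
--     esc = '\\' * (2 ** depth - 1)
--     return ''.join(esc + ch if ch in '\\$~&|' else ch for ch in command)
--
--
-- def quotecommands(commands):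
--     """
--     SSH command quoting: one linear per-character pass per command
--     (every char in \\$~&| maps uniformly to escapechar+char), joined once.
--     """
--     pieces = [_escape_once(command, depth) for depth, command in enumerate(commands)]
--     return ' '.join(pieces).strip()
-- ===== Notes on version B (the rewrite author's own statement) =====
-- stated objective: idiomatic
-- what changed: The per-command escaping becomes one per-character pass (every char in \$~&| maps uniformly to escapechar+char) instead of five successive full-string str.replace passes, and the result is built with ' '.join over a list of pieces instead of string accumulation with a leading-space strip.
import Mathlib
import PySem

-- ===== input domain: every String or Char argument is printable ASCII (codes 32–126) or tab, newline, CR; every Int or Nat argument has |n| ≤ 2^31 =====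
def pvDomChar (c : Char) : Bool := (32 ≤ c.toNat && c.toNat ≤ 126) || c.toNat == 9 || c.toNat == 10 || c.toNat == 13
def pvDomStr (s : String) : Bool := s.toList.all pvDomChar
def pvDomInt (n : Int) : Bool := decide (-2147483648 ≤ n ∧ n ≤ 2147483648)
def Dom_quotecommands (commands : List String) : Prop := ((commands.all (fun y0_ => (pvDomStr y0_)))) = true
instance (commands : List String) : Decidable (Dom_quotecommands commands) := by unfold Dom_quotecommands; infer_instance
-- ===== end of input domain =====

-- B rewrites the per-command multi-pass str.replace escaping as one per-character pass
-- and builds the result with ' '.join instead of accumulation+strip (objective: idiomatic).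


-- ===== PORT A =====
-- getescapechar(depth): '\\' * (2**depth - 1); depth comes from enumerate so depth ≥ 0,
-- hence 2**depth is 2 ^ depth.toNat exactly.
def pvGetescapechar (depth : Int) : List Char :=
  List.replicate (2 ^ depth.toNat - 1) '\\'

def pvSpecialchars : List Char := ['$', '~', '&', '|']

-- escape(command, depth): replace '\\' first, then each special char, in order.
def pvEscape (command : List Char) (depth : Int) : List Char :=
  let escapechar := pvGetescapechar depth
  let e0 := PySem.Chars.replace command ['\\'] (List.replicate (2 ^ depth.toNat) '\\')
  pvSpecialchars.foldl (fun acc ch => PySem.Chars.replace acc [ch] (escapechar ++ [ch])) e0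

-- for depth, command in enumerate(commands): res += ' ' + escape(command, depth); return res.strip()
-- (the loop body's own 'escapechar = getescapechar(depth)' is unused and 'depth = len(commands)-1'
--  is immediately shadowed by the loop variable; both are dead code)
def quotecommands (commands : List String) : String :=
  String.ofList (PySem.Chars.strip
    ((PySem.List.enumerate (commands.map String.toList) 0).foldl
      (fun res p => res ++ ' ' :: pvEscape p.2 p.1) []))

-- ===== PORT B =====
-- _escape_once: one pass over the command; every char in '\$~&|' maps to esc+char.
def pvEscapeOnce (command : List Char) (depth : Int) : List Char :=
  let esc := List.replicate (2 ^ depth.toNat - 1) '\\'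
  command.flatMap (fun ch => if ch ∈ ['\\', '$', '~', '&', '|'] then esc ++ [ch] else [ch])

-- ' '.join(pieces).strip()
def quotecommands_alt (commands : List String) : String :=
  String.ofList (PySem.Chars.strip
    (PySem.Chars.join [' ']
      ((PySem.List.enumerate (commands.map String.toList) 0).map (fun p => pvEscapeOnce p.2 p.1))))

-- ===== PRECONDITION & SPEC =====
def Spec_quotecommands (commands : List String) (out : String) : Prop := out = quotecommands_alt commands
instance (commands : List String) (out : String) : Decidable (Spec_quotecommands commands out) := by unfold Spec_quotecommands; infer_instance

-- ===== CLAIM (what is proved, stated in full; the proofs are below) =====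
def Claim_equal_quotecommands : Prop := ∀ (commands : List String), Dom_quotecommands commands → Spec_quotecommands commands (quotecommands commands)

-- ===== LEMMAS AND PROOFS =====

-- str.replace with a single-character pattern is a per-character flatMap
theorem pvGoSingle (c : Char) (t : List Char) : ∀ (fuel : ℕ) (l acc : List Char), l.length ≤ fuel →
    PySem.Chars.replace.go [c] t fuel l acc
      = acc.reverse ++ l.flatMap (fun x => if x = c then t else [x]) := by
  intro fuel
  induction fuel with
  | zero => intro l acc h; simp at h; simp [h, PySem.Chars.replace.go]
  | succ n ih =>
    intro l acc h
    cases l with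
    | nil => simp [PySem.Chars.replace.go]
    | cons c' t' =>
      simp only [PySem.Chars.replace.go, List.isPrefixOf, Bool.and_true]
      by_cases hc : c' = c
      · subst hc
        simp only [beq_self_eq_true, if_pos]
        rw [ih _ _ (by simpa using Nat.le_of_succ_le_succ h)]
        simp [List.flatMap_cons]
      · simp only [beq_iff_eq]
        rw [if_neg (fun hh => hc hh.symm)]
        rw [ih _ _ (by simpa using Nat.le_of_succ_le_succ h)]
        simp [List.flatMap_cons, hc]

theorem pvReplaceSingle (l : List Char) (c : Char) (t : List Char) :
    PySem.Chars.replace l [c] t = l.flatMap (fun x => if x = c then t else [x]) := by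
  simp only [PySem.Chars.replace, List.isEmpty_cons, Bool.false_eq_true, if_false]
  rw [pvGoSingle c t l.length l [] le_rfl]
  simp

-- a flatMap that replaces nothing is the identity
theorem pvFlatMapId {f : Char → List Char} (l : List Char) (h : ∀ x ∈ l, f x = [x]) :
    l.flatMap f = l := by
  induction l with
  | nil => simp
  | cons a t ih =>
    simp only [List.flatMap_cons, h a (by simp)]
    simp [ih (fun x hx => h x (by simp [hx]))]

theorem pvFlatMapRepl (n : ℕ) (ci : Char) (hci : ci ≠ '\\') (t : List Char) :
    (List.replicate n '\\').flatMap (fun y => if y = ci then t else [y]) = List.replicate n '\\' := by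
  apply pvFlatMapId
  intro x hx
  rw [List.eq_of_mem_replicate hx]
  rw [if_neg (fun hh => hci hh.symm)]

-- the four successive special-char replaces after the backslash replace collapse to B's single pass
theorem pvEscapeEq (command : List Char) (depth : Int) :
    pvEscape command depth = pvEscapeOnce command depth := by
  have hpow : (2 : ℕ) ^ depth.toNat - 1 + 1 = 2 ^ depth.toNat :=
    Nat.sub_add_cancel (Nat.one_le_two_pow)
  have rD := fun (nn : ℕ) (t : List Char) => pvFlatMapRepl nn '$' (by decide) t
  have rT := fun (nn : ℕ) (t : List Char) => pvFlatMapRepl nn '~' (by decide) t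
  have rA := fun (nn : ℕ) (t : List Char) => pvFlatMapRepl nn '&' (by decide) t
  have rP := fun (nn : ℕ) (t : List Char) => pvFlatMapRepl nn '|' (by decide) t
  simp only [pvEscape, pvEscapeOnce, pvSpecialchars, pvGetescapechar, List.foldl_cons,
    List.foldl_nil, pvReplaceSingle]
  induction command with
  | nil => simp
  | cons a t ih =>
    simp only [List.flatMap_cons, List.flatMap_append]
    rw [ih]
    congr 1
    by_cases h1 : a = '\\'
    · subst h1
      simp only [rD, rT, rA, rP, List.mem_cons, List.not_mem_nil, or_false,
        true_or, if_pos]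
      rw [← hpow]
      simp [List.replicate_succ']
    · by_cases h2 : a = '$'
      · subst h2
        simp [reduceIte, rT, rA, rP, List.flatMap_append]
      · by_cases h3 : a = '~'
        · subst h3
          simp [reduceIte, rA, rP, List.flatMap_append]
        · by_cases h4 : a = '&'
          · subst h4
            simp [reduceIte, rP, List.flatMap_append]
          · by_cases h5 : a = '|'
            · subst h5
              simp [reduceIte]
            · simp [h1, h2, h3, h4, h5]

-- ' ' is whitespace, so strip eats a leading joiner space
theorem pvStripConsSpace (s : List Char) : PySem.Chars.strip (' ' :: s) = PySem.Chars.strip s := by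
  simp [PySem.Chars.strip, PySem.Chars.lstrip, List.dropWhile,
    show PySem.Chars.isspace ' ' = true from by decide]

-- flatMap (' ' :: ·) over a nonempty list is ' ' followed by the join
theorem pvFlatMapJoinAux (p : List Char) (ps : List (List Char)) :
    (p :: ps).flatMap (fun x => ' ' :: x) = ' ' :: PySem.Chars.join [' '] (p :: ps) := by
  induction ps generalizing p with
  | nil => simp [PySem.Chars.join, List.intercalate]
  | cons q qs ih =>
    rw [PySem.Chars.join_cons_cons]
    have h := ih q
    simp only [List.flatMap_cons] at h ⊢
    rw [h]
    simp

-- prefixing every piece with ' ' then stripping equals joining with ' ' then stripping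
theorem pvStripFlatMapJoin (parts : List (List Char)) :
    PySem.Chars.strip (parts.flatMap (fun x => ' ' :: x))
      = PySem.Chars.strip (PySem.Chars.join [' '] parts) := by
  cases parts with
  | nil => simp [PySem.Chars.join, List.intercalate]
  | cons p ps =>
    rw [pvFlatMapJoinAux p ps, pvStripConsSpace]

-- ===== VERDICT (by name: the statement is the Claim_ definition above) =====
theorem quotecommands_spec : Claim_equal_quotecommands := by
  intro commands _
  unfold Spec_quotecommands quotecommands quotecommands_alt
  simp only [PySem.List.foldl_append_eq_flatMap (g := fun p : Int × List Char => ' ' :: pvEscape p.2 p.1)]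
  simp only [List.nil_append, pvEscapeEq]
  rw [show (PySem.List.enumerate (commands.map String.toList) 0).flatMap
        (fun p => ' ' :: pvEscapeOnce p.2 p.1)
      = ((PySem.List.enumerate (commands.map String.toList) 0).map
          (fun p => pvEscapeOnce p.2 p.1)).flatMap (fun x => ' ' :: x) from by
    rw [List.flatMap_map]]
  rw [pvStripFlatMapJoin]
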